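-- pv_equiv track=rewrite | github.com/klichukb/django-migrate-sql | tests/test_app/test_migrations.py | contains_ordered
-- ===== SOURCE A (Python) =====
-- def contains_ordered(lst, order):
--     """
--     Checks if `order` sequence exists in `lst` in the defined order.
--     """
--     prev_idx = -1
--     try:
--         for item in order:
--             idx = lst.index(item)
--             if idx <= prev_idx:
--                 return False
--             prev_idx = idx
--     except ValueError:
--         return False
--     return True
-- ===== SOURCE B (Python) =====
-- def contains_ordered(lst, order):
--     """
--     Checks if `order` sequence exists in `lst` in the defined order.
--     """
--     # `order` appears with increasing first-indices in lst  <=>  `order` is a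
--     # subsequence of lst with its duplicates removed (first occurrences kept):
--     # dedup once, then a greedy subsequence pointer scan over the dedup.
--     seen = set()
--     uniq = []
--     for x in lst:
--         if x not in seen:
--             seen.add(x)
--             uniq.append(x)
--     pos = 0
--     for x in uniq:
--         if pos < len(order) and x == order[pos]:
--             pos += 1
--     return pos == len(order)
-- ===== Notes on version B (the rewrite author's own statement) =====
-- stated objective: alternative
-- what changed: B uses the characterization that the order's first-indices increase iff order is a subsequence of lst deduplicated to first occurrences: it dedups lst in one pass and then runs a greedy subsequence pointer scan over the dedup, instead of A's loop of per-item lst.index scans compared against a running previous index.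
import Mathlib
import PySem

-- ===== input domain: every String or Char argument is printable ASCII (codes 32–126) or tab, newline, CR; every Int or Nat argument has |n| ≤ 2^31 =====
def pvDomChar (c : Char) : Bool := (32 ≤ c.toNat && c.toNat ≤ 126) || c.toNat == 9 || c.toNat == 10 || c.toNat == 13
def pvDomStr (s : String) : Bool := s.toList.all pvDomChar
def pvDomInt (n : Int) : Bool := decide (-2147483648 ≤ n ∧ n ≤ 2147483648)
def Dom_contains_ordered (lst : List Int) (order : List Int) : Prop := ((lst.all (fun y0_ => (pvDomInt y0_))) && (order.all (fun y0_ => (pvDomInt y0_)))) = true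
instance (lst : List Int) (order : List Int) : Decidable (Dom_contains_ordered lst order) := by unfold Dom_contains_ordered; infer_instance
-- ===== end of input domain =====

-- B replaces A's per-item lst.index scans by one dedup pass over lst followed by a
-- greedy subsequence pointer scan of `order` along the dedup (alternative algorithm).

-- ===== PORT A =====
-- the for-loop over `order` with its running prev_idx; lst.index → PySem.List.index? (none = ValueError → return False)
def coLoopA (lst : List Int) (prev : Int) : List Int → Bool
  | [] => true
  | item :: rest =>
    match PySem.List.index? lst item with
    | none => false
    | some idx => if (idx : Int) ≤ prev then false else coLoopA lst (idx : Int) rest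

def contains_ordered (lst : List Int) (order : List Int) : Bool :=
  coLoopA lst (-1) order

-- ===== PORT B =====
-- first loop: seen-set + uniq list of first occurrences
def coUniq (lst : List Int) : List Int :=
  (lst.foldl (fun p x => if p.1.contains x then p else (p.1.add x, p.2 ++ [x]))
    ((PySem.Set.empty : PySem.Set Int), ([] : List Int))).2

-- second loop: greedy pointer scan, `if pos < len(order) and x == order[pos]: pos += 1`
def contains_ordered_alt (lst : List Int) (order : List Int) : Bool :=
  let uniq := coUniq lst
  let pos := uniq.foldl
    (fun (pos : Int) x =>
      if pos < (order.length : Int) && (PySem.List.pyGet? order pos == some x)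
      then pos + 1 else pos) 0
  pos == (order.length : Int)

-- ===== PRECONDITION & SPEC =====
def Spec_contains_ordered (lst : List Int) (order : List Int) (out : Bool) : Prop := out = contains_ordered_alt lst order
instance (lst : List Int) (order : List Int) (out : Bool) : Decidable (Spec_contains_ordered lst order out) := by unfold Spec_contains_ordered; infer_instance

-- ===== CLAIM (what is proved, stated in full; the proofs are below) =====
def Claim_equal_contains_ordered : Prop := ∀ (lst : List Int) (order : List Int), Dom_contains_ordered lst order → Spec_contains_ordered lst order (contains_ordered lst order)

-- ===== LEMMAS AND PROOFS =====

-- recursive form of the dedup pass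
def coDedup (seen : PySem.Set Int) : List Int → List Int
  | [] => []
  | x :: xs => if seen.contains x then coDedup seen xs else x :: coDedup (seen.add x) xs

theorem coUniq_foldl (lst : List Int) (s : PySem.Set Int) (acc : List Int) :
    (lst.foldl (fun p x => if p.1.contains x then p else (p.1.add x, p.2 ++ [x])) (s, acc)).2
      = acc ++ coDedup s lst := by
  induction lst generalizing s acc with
  | nil => simp [coDedup]
  | cons x xs ih =>
    simp only [List.foldl_cons, coDedup]
    by_cases h : s.contains x
    · rw [if_pos h, if_pos h, ih]
    · rw [if_neg h, if_neg h, ih, List.append_assoc]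
      rfl

theorem coUniq_eq (lst : List Int) : coUniq lst = coDedup PySem.Set.empty lst := by
  unfold coUniq; rw [coUniq_foldl]; simp

theorem mem_coDedup (lst : List Int) (s : PySem.Set Int) (v : Int) :
    v ∈ coDedup s lst ↔ v ∈ lst ∧ v ∉ s := by
  induction lst generalizing s with
  | nil => simp [coDedup]
  | cons x xs ih =>
    simp only [coDedup]
    by_cases h : s.contains x
    · rw [if_pos h, ih]
      rw [PySem.Set.contains_iff] at h
      simp only [List.mem_cons]
      constructor
      · rintro ⟨hv, hs⟩; exact ⟨Or.inr hv, hs⟩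
      · rintro ⟨rfl | hv, hs⟩
        · exact absurd h hs
        · exact ⟨hv, hs⟩
    · rw [if_neg h]
      have hx : x ∉ s := by
        intro hm
        rw [PySem.Set.contains_iff] at h
        exact h hm
      simp only [List.mem_cons, ih, PySem.Set.mem_add]
      constructor
      · rintro (rfl | ⟨hv, hs⟩)
        · exact ⟨Or.inl rfl, hx⟩
        · exact ⟨Or.inr hv, fun hm => hs (Or.inl hm)⟩
      · rintro ⟨rfl | hv, hs⟩
        · exact Or.inl rfl
        · by_cases hvx : v = x
          · exact Or.inl hvx
          · exact Or.inr ⟨hv, fun hm => hm.elim hs hvx⟩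

-- index of v in lst as an Int, -1 when absent
def coIdxZ (lst : List Int) (v : Int) : Int :=
  match PySem.List.index? lst v with
  | some n => (n : Int)
  | none => -1

theorem coIdxZ_cons_of_mem (x v : Int) (xs : List Int) (hv : v ∈ xs) (hne : v ≠ x) :
    coIdxZ (x :: xs) v = coIdxZ xs v + 1 := by
  unfold coIdxZ
  rw [PySem.List.index?_cons_of_ne _ (fun h => hne h.symm)]
  rcases h : PySem.List.index? xs v with _ | n
  · rw [PySem.List.index?_eq_none_iff] at h; exact absurd hv h
  · simp

theorem coDedup_pairwise_idx (lst : List Int) :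
    ∀ s, (coDedup s lst).Pairwise (fun a b => coIdxZ lst a < coIdxZ lst b) := by
  induction lst with
  | nil => intro s; simp [coDedup]
  | cons x xs ih =>
    intro s
    have hmemtail : ∀ (t : PySem.Set Int) (v : Int), v ∈ coDedup (PySem.Set.add t x) xs → v ≠ x := by
      intro t v hv
      rw [mem_coDedup] at hv
      intro heq
      apply hv.2
      rw [PySem.Set.mem_add]
      exact Or.inr heq
    have hstep : ∀ (a b : Int), a ∈ xs → b ∈ xs → a ≠ x → b ≠ x →
        coIdxZ xs a < coIdxZ xs b → coIdxZ (x :: xs) a < coIdxZ (x :: xs) b := by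
      intro a b ha hb hax hbx hlt
      rw [coIdxZ_cons_of_mem x a xs ha hax, coIdxZ_cons_of_mem x b xs hb hbx]
      omega
    simp only [coDedup]
    by_cases h : s.contains x
    · rw [if_pos h]
      -- every member of coDedup s xs is ∉ s, hence ≠ x since x ∈ s
      have hne : ∀ v ∈ coDedup s xs, v ≠ x := by
        intro v hv heq
        rw [mem_coDedup] at hv
        rw [PySem.Set.contains_iff] at h
        exact hv.2 (heq ▸ h)
      refine List.Pairwise.imp_of_mem ?_ (ih s)
      intro a b ha hb hlt
      have ha' := (mem_coDedup xs s a).1 ha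
      have hb' := (mem_coDedup xs s b).1 hb
      exact hstep a b ha'.1 hb'.1 (hne a ha) (hne b hb) hlt
    · rw [if_neg h]
      constructor
      · intro b hb
        have hbne := hmemtail s b hb
        have hb' := (mem_coDedup xs (s.add x) _).1 hb
        have hx : coIdxZ (x :: xs) x = 0 := by
          unfold coIdxZ; rw [PySem.List.index?_cons_self]; rfl
        rw [hx, coIdxZ_cons_of_mem x b xs hb'.1 hbne]
        have : 0 ≤ coIdxZ xs b := by
          unfold coIdxZ
          rcases hi : PySem.List.index? xs b with _ | n
          · rw [PySem.List.index?_eq_none_iff] at hi; exact absurd hb'.1 hi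
          · simp
        omega
      · refine List.Pairwise.imp_of_mem ?_ (ih (s.add x))
        intro a b ha hb hlt
        have ha' := (mem_coDedup xs (s.add x) _).1 ha
        have hb' := (mem_coDedup xs (s.add x) _).1 hb
        exact hstep a b ha'.1 hb'.1 (hmemtail s a ha) (hmemtail s b hb) hlt

-- greedy remainder: what is left of `order` after the greedy scan over u
def coGreedyRem : List Int → List Int → List Int
  | _, [] => []
  | [], o :: os => o :: os
  | x :: u, o :: os => if x = o then coGreedyRem u os else coGreedyRem u (o :: os)

theorem coGreedyRem_nil (o : List Int) : coGreedyRem [] o = o := by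
  cases o <;> rfl

theorem coGreedyRem_nil_right (u : List Int) : coGreedyRem u [] = [] := by
  cases u <;> rfl

theorem coGreedyRem_not_mem (u : List Int) (o : Int) (os : List Int) (h : o ∉ u) :
    coGreedyRem u (o :: os) = o :: os := by
  induction u with
  | nil => rfl
  | cons x u ih =>
    have hne : x ≠ o := fun he => h (he ▸ List.mem_cons_self)
    simp only [coGreedyRem, if_neg hne]
    exact ih (fun hm => h (List.mem_cons_of_mem _ hm))

theorem coGreedyRem_split (d₁ d₂ : List Int) (o : Int) (os : List Int) (h : o ∉ d₁) :
    coGreedyRem (d₁ ++ o :: d₂) (o :: os) = coGreedyRem d₂ os := by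
  induction d₁ with
  | nil => simp [coGreedyRem]
  | cons x d₁ ih =>
    have hne : x ≠ o := fun he => h (he ▸ List.mem_cons_self)
    simp only [List.cons_append, coGreedyRem, if_neg hne]
    exact ih (fun hm => h (List.mem_cons_of_mem _ hm))

-- the filtered suffix of the dedup still to be matched after prev
def coAfter (lst : List Int) (prev : Int) : List Int :=
  (coDedup PySem.Set.empty lst).filter (fun v => decide (prev < coIdxZ lst v))

theorem mem_coDedup_empty (lst : List Int) (v : Int) :
    v ∈ coDedup PySem.Set.empty lst ↔ v ∈ lst := by
  rw [mem_coDedup]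
  simp [PySem.Set.empty]

theorem coIdxZ_nonneg_of_mem (lst : List Int) (v : Int) (h : v ∈ lst) : 0 ≤ coIdxZ lst v := by
  unfold coIdxZ
  rcases hi : PySem.List.index? lst v with _ | n
  · rw [PySem.List.index?_eq_none_iff] at hi; exact absurd h hi
  · simp

-- main bridge: A's loop equals "greedy over the dedup suffix past prev consumes all of order"
theorem coLoopA_eq_greedy (lst : List Int) (order : List Int) :
    ∀ prev, coLoopA lst prev order = (coGreedyRem (coAfter lst prev) order).isEmpty := by
  induction order with
  | nil => intro prev; simp [coLoopA, coGreedyRem]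
  | cons o os ih =>
    intro prev
    rw [coLoopA]
    rcases hio : PySem.List.index? lst o with _ | k
    · -- o ∉ lst → o ∉ coAfter → greedy leaves o::os
      have ho : o ∉ lst := (PySem.List.index?_eq_none_iff _ _).1 hio
      have hno : o ∉ coAfter lst prev := by
        intro hm
        exact ho ((mem_coDedup_empty lst o).1 (List.mem_of_mem_filter hm))
      rw [coGreedyRem_not_mem _ _ _ hno]
      simp
    · simp only
      have ho : o ∈ lst := by
        rw [← PySem.List.index?_isSome_iff, hio]; rfl
      have hidx : coIdxZ lst o = (k : Int) := by unfold coIdxZ; rw [hio]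
      by_cases hle : (k : Int) ≤ prev
      · rw [if_pos hle]
        -- o filtered out: prev < idx o fails
        have hno : o ∉ coAfter lst prev := by
          intro hm
          have := List.of_mem_filter hm
          rw [hidx] at this
          simp at this
          omega
        rw [coGreedyRem_not_mem _ _ _ hno]
        simp
      · rw [if_neg hle]
        have hprevk : prev < (k : Int) := by omega
        -- split the dedup at o
        have hoD : o ∈ coDedup PySem.Set.empty lst := (mem_coDedup_empty lst o).2 ho
        obtain ⟨d₁, d₂, hsplit⟩ := List.append_of_mem hoD
        have hpw := coDedup_pairwise_idx lst PySem.Set.empty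
        rw [hsplit] at hpw
        rw [List.pairwise_append] at hpw
        obtain ⟨hpw1, hpw2, hpw12⟩ := hpw
        have hd1 : ∀ a ∈ d₁, coIdxZ lst a < (k : Int) := by
          intro a ha
          have := hpw12 a ha o List.mem_cons_self
          rwa [hidx] at this
        have hd2 : ∀ b ∈ d₂, (k : Int) < coIdxZ lst b := by
          intro b hb
          have := (List.pairwise_cons.1 hpw2).1 b hb
          rwa [hidx] at this
        have hod1 : o ∉ d₁ := by
          intro hm
          have := hd1 o hm
          omega
        -- coAfter prev = d₁.filter ++ o :: d₂
        have hAprev : coAfter lst prev =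
            d₁.filter (fun v => decide (prev < coIdxZ lst v)) ++ o :: d₂ := by
          unfold coAfter
          rw [hsplit, List.filter_append, List.filter_cons]
          have hoT : (decide (prev < coIdxZ lst o)) = true := by
            rw [hidx]; simpa using hprevk
          rw [if_pos hoT]
          congr 1
          congr 1
          apply List.filter_eq_self.2
          intro b hb
          have := hd2 b hb
          simp
          omega
        have hAk : coAfter lst (k : Int) = d₂ := by
          unfold coAfter
          rw [hsplit, List.filter_append, List.filter_cons]
          have hoF : (decide ((k : Int) < coIdxZ lst o)) = false := by
            rw [hidx]; simp
          rw [if_neg (by simp [hoF])]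
          have h1 : d₁.filter (fun v => decide ((k : Int) < coIdxZ lst v)) = [] := by
            apply List.filter_eq_nil_iff.2
            intro a ha
            have := hd1 a ha
            simp
            omega
          rw [h1, List.nil_append]
          apply List.filter_eq_self.2
          intro b hb
          have := hd2 b hb
          simp
          omega
        have hod1' : o ∉ d₁.filter (fun v => decide (prev < coIdxZ lst v)) := by
          intro hm
          exact hod1 (List.mem_of_mem_filter hm)
        rw [hAprev, coGreedyRem_split _ _ _ _ hod1', ih (k : Int), hAk]

-- B's pointer fold equals |order| minus the length of the greedy remainder
theorem coFold_eq_greedy (order : List Int) :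
    ∀ (u : List Int) (p : Nat), p ≤ order.length →
    u.foldl (fun (pos : Int) x =>
      if pos < (order.length : Int) && (PySem.List.pyGet? order pos == some x)
      then pos + 1 else pos) (p : Int)
    = (order.length : Int) - ((coGreedyRem u (order.drop p)).length : Int) := by
  intro u
  induction u with
  | nil =>
    intro p hp
    rw [List.foldl_nil, coGreedyRem_nil, List.length_drop]
    omega
  | cons x u ih =>
    intro p hp
    rw [List.foldl_cons]
    by_cases hlt : p < order.length
    · have hdrop : order.drop p = order[p] :: order.drop (p + 1) :=
        (List.getElem_cons_drop (by omega)).symm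
      have hget : PySem.List.pyGet? order (p : Int) = some order[p] :=
        PySem.List.pyGet?_ofNat order p hlt
      by_cases hx : x = order[p]
      · have hcond : ((p : Int) < (order.length : Int) &&
            (PySem.List.pyGet? order (p : Int) == some x)) = true := by
          rw [hget, hx]
          simp
          omega
        rw [if_pos hcond]
        have := ih (p + 1) (by omega)
        push_cast at this ⊢
        rw [this, hdrop]
        simp only [coGreedyRem, if_pos hx]
      · have hcond : ¬ (((p : Int) < (order.length : Int) &&
            (PySem.List.pyGet? order (p : Int) == some x)) = true) := by
          simp
          intro _ h
          rw [List.getElem?_eq_getElem hlt] at h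
          exact hx (Option.some.inj h).symm
        rw [if_neg hcond]
        rw [ih p hp, hdrop]
        simp only [coGreedyRem, if_neg hx]
    · have hpe : p = order.length := by omega
      have hnlt : ¬ ((p : Int) < (order.length : Int)) := by omega
      have hcond : ¬ (((p : Int) < (order.length : Int) &&
          (PySem.List.pyGet? order (p : Int) == some x)) = true) := by
        simp
        intro h
        omega
      rw [if_neg hcond]
      rw [ih p hp, hpe, List.drop_length, coGreedyRem_nil_right, coGreedyRem_nil_right]

theorem coAfter_neg_one (lst : List Int) : coAfter lst (-1) = coDedup PySem.Set.empty lst := by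
  unfold coAfter
  apply List.filter_eq_self.2
  intro v hv
  have := coIdxZ_nonneg_of_mem lst v ((mem_coDedup_empty lst v).1 hv)
  simp
  omega

-- ===== VERDICT (by name: the statement is the Claim_ definition above) =====
theorem contains_ordered_spec : Claim_equal_contains_ordered := by
  intro lst order _
  unfold Spec_contains_ordered contains_ordered
  rw [coLoopA_eq_greedy lst order (-1), coAfter_neg_one]
  have hf := coFold_eq_greedy order (coDedup PySem.Set.empty lst) 0 (by omega)
  simp only [Nat.cast_zero, List.drop_zero] at hf
  simp only [contains_ordered_alt, coUniq_eq, hf]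
  rcases h : coGreedyRem (coDedup PySem.Set.empty lst) order with _ | ⟨r, rs⟩
  · simp
  · simp
    omega
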